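-- pv_equiv track=rewrite | github.com/TomHigginson/Advent-of-Code | 2024/Day7/Day7-BridgeRepair.py | Check_pt1
-- ===== SOURCE A (Python) =====
-- def Check_pt1(numbers, test, index=1, Total=None):
--     """
--     Goes through all the number sets and applies multiplier or addition.
--     Please call as Check(number list, test) as index and Total are only used in the recursion
--     """
--
--     if Total is None:
--         Total = numbers[0]
--
--     # Check if we have obtained the target ONLY if we have used ALL numbers.
--     if index == len(numbers):
--         if Total == test:
--             return True,Total
--         return False, None
--
--     Next = numbers[index]
--
--     # Addition
--     add,totadd = Check_pt1(numbers, test, index + 1, Total + Next)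
--     if add:
--         return True,totadd
--
--     # Multiplication
--     mult,totMult = Check_pt1(numbers, test, index+1, Total * Next)
--     if mult:
--         return True, totMult
--
--     return False, None
-- ===== SOURCE B (Python) =====
-- def Check_pt1(numbers, test, index=1, Total=None):
--     """Backward search: maintain the set of values from which the remaining
--     suffix can still reach test; multiplication is pruned to exact divisors."""
--     if Total is None:
--         Total = numbers[0]
--     targets = {test}
--     for i in range(len(numbers) - 1, index - 1, -1):
--         n = numbers[i]
--         if n == 0 and 0 in targets:
--             return True, test
--         nxt = set()
--         for s in targets:
--             nxt.add(s - n)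
--             if n != 0 and s % n == 0:
--                 nxt.add(s // n)
--         targets = nxt
--     if Total in targets:
--         return True, test
--     return False, None
-- ===== Notes on version B (the rewrite author's own statement) =====
-- stated objective: alternative
-- what changed: A exhaustively recurses forward over all +/x operator choices; B searches backward from the target, maintaining the set of values the remaining suffix must start from (always subtract, divide only when the division is exact), which dedups partial results and takes the division branch only on exact divisors.
-- outside the precondition, e.g. on Check_pt1([], 5, 0, None): A raises IndexError, B raises IndexError; on Check_pt1([1, 2], 5, 3, 7): A raises IndexError, B returns (False, None)
import Mathlib
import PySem

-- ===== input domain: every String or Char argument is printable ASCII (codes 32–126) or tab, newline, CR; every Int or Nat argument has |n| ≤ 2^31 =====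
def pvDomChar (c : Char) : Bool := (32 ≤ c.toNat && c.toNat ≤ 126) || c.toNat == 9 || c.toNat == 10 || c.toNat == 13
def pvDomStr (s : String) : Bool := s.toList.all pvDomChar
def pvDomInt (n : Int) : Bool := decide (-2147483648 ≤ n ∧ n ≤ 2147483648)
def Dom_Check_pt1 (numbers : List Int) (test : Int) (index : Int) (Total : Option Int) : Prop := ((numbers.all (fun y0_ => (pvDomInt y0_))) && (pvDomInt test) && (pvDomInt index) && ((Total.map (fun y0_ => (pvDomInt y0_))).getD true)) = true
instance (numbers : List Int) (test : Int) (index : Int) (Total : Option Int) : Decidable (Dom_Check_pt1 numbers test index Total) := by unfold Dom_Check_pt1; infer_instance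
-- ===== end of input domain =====

-- B replaces A's exhaustive forward +/× recursion by a backward set search from `test`
-- (subtract always, divide only when exact): a different algorithm of similar size.

-- ===== PORT A =====
-- A's recursion, fuel = number of remaining indices + 1 (enough under Pre_).
def Check_pt1_go (numbers : List Int) (test : Int) : Nat → Int → Int → Bool × Option Int
  | 0, _, _ => (false, none)          -- unreachable under Pre_ (fuel suffices)
  | fuel + 1, index, Total =>
    if index = (numbers.length : Int) then
      if Total = test then (true, some Total) else (false, none)
    else
      match PySem.List.pyGet? numbers index with
      | none => (false, none)         -- IndexError in Python; excluded by Pre_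
      | some Next =>
        let r1 := Check_pt1_go numbers test fuel (index + 1) (Total + Next)
        if r1.1 then (true, r1.2)
        else
          let r2 := Check_pt1_go numbers test fuel (index + 1) (Total * Next)
          if r2.1 then (true, r2.2) else (false, none)

def Check_pt1 (numbers : List Int) (test : Int) (index : Int) (Total : Option Int) : Bool × Option Int :=
  match (match Total with
         | some t => some t
         | none => PySem.List.pyGet? numbers 0) with   -- Total = numbers[0]
  | none => (false, none)             -- IndexError in Python; excluded by Pre_
  | some t => Check_pt1_go numbers test (((numbers.length : Int) - index).toNat + 1) index t

-- ===== PORT B =====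
-- inner loop: for s in targets: nxt.add(s - n); if n != 0 and s % n == 0: nxt.add(s // n)
def Check_pt1_backStep (S : PySem.Set Int) (n : Int) : PySem.Set Int :=
  S.foldl (fun nxt s =>
    let nxt1 := PySem.Set.add nxt (s - n)
    if n ≠ 0 ∧ PySem.Int.mod s n = 0 then PySem.Set.add nxt1 (PySem.Int.floordiv s n) else nxt1)
    PySem.Set.empty

-- the countdown loop; `none` = the early `return True, test`
def Check_pt1_altGo (numbers : List Int) : Nat → Int → PySem.Set Int → Option (PySem.Set Int)
  | 0, _, S => some S
  | fuel + 1, i, S =>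
    match PySem.List.pyGet? numbers i with
    | none => some S                  -- IndexError in Python; excluded by Pre_
    | some n =>
      if n = 0 ∧ PySem.Set.contains S 0 then none
      else Check_pt1_altGo numbers fuel (i - 1) (Check_pt1_backStep S n)

def Check_pt1_alt (numbers : List Int) (test : Int) (index : Int) (Total : Option Int) : Bool × Option Int :=
  match (match Total with
         | some t => some t
         | none => PySem.List.pyGet? numbers 0) with
  | none => (false, none)
  | some t =>
    match Check_pt1_altGo numbers (((numbers.length : Int) - index).toNat)
            ((numbers.length : Int) - 1) (PySem.Set.ofList [test]) with
    | none => (true, some test)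
    | some S => if PySem.Set.contains S t then (true, some test) else (false, none)

-- ===== PRECONDITION & SPEC =====
-- Pre_ excludes exactly the inputs where A raises IndexError: numbers[0] on an
-- empty list when Total is None, and recursion indices outside [-len, len].
def Pre_Check_pt1 (numbers : List Int) (test : Int) (index : Int) (Total : Option Int) : Prop :=
  (Total = none → numbers ≠ []) ∧
  -(numbers.length : Int) ≤ index ∧ index ≤ (numbers.length : Int)

instance (numbers : List Int) (test : Int) (index : Int) (Total : Option Int) : Decidable (Pre_Check_pt1 numbers test index Total) := by unfold Pre_Check_pt1; infer_instance

def pvWitness_Check_pt1 : List Int × Int × Int × Option Int := ([2, 3, 4], 20, 1, none)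

def Spec_Check_pt1 (numbers : List Int) (test : Int) (index : Int) (Total : Option Int) (out : Bool × Option Int) : Prop := out = Check_pt1_alt numbers test index Total
instance (numbers : List Int) (test : Int) (index : Int) (Total : Option Int) (out : Bool × Option Int) : Decidable (Spec_Check_pt1 numbers test index Total out) := by unfold Spec_Check_pt1; infer_instance

-- ===== CLAIM (what is proved, stated in full; the proofs are below) =====
def Claim_equal_Check_pt1 : Prop := ∀ (numbers : List Int) (test : Int) (index : Int) (Total : Option Int), Dom_Check_pt1 numbers test index Total → Pre_Check_pt1 numbers test index Total → Spec_Check_pt1 numbers test index Total (Check_pt1 numbers test index Total)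

-- ===== LEMMAS AND PROOFS =====

-- the numbers A still consumes, starting at position i
def tailNums (numbers : List Int) (i : Int) : List Int :=
  (PySem.List.pyRange i (numbers.length : Int) 1).map (fun j => PySem.List.pyGetD numbers j 0)

-- can `t` reach `test` by folding + / × through ns?
def reachB (test : Int) : Int → List Int → Bool
  | t, [] => decide (t = test)
  | t, n :: ns => reachB test (t + n) ns || reachB test (t * n) ns

theorem pyGet?_eq_getD (numbers : List Int) (i : Int)
    (h1 : -(numbers.length : Int) ≤ i) (h2 : i < (numbers.length : Int)) :
    PySem.List.pyGet? numbers i = some (PySem.List.pyGetD numbers i 0) := by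
  have hr : PySem.Raise.InRange numbers.length i := by constructor <;> simp_all
  rcases Option.eq_none_or_eq_some (PySem.List.pyGet? numbers i) with h | ⟨x, hx⟩
  · rw [PySem.List.pyGet?_eq_none_iff] at h; exact absurd hr h
  · rw [hx]; simp [PySem.List.pyGetD, hx]

theorem tailNums_cons (numbers : List Int) (i : Int) (h : i < (numbers.length : Int)) :
    tailNums numbers i = PySem.List.pyGetD numbers i 0 :: tailNums numbers (i + 1) := by
  unfold tailNums
  rw [PySem.List.pyRange_one_cons h, List.map_cons]

theorem tailNums_len (numbers : List Int) : tailNums numbers (numbers.length : Int) = [] := by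
  unfold tailNums
  rw [PySem.List.pyRange_one_eq_nil le_rfl, List.map_nil]

-- A's recursion computes reachB
theorem goA_eq (numbers : List Int) (test : Int) :
    ∀ (fuel : Nat) (i T : Int), -(numbers.length : Int) ≤ i → i ≤ (numbers.length : Int) →
      ((numbers.length : Int) - i).toNat < fuel →
      Check_pt1_go numbers test fuel i T =
        (reachB test T (tailNums numbers i),
         if reachB test T (tailNums numbers i) then some test else none) := by
  intro fuel
  induction fuel with
  | zero => intro i T _ _ hf; omega
  | succ fuel ih =>
    intro i T h1 h2 hf
    by_cases hi : i = (numbers.length : Int)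
    · subst hi
      simp only [Check_pt1_go, tailNums_len, reachB]
      by_cases hT : T = test
      · simp [hT]
      · simp [hT]
    · have hlt : i < (numbers.length : Int) := lt_of_le_of_ne h2 hi
      rw [tailNums_cons numbers i hlt]
      simp only [Check_pt1_go, if_neg hi, pyGet?_eq_getD numbers i h1 hlt, reachB]
      rw [ih (i+1) (T + PySem.List.pyGetD numbers i 0) (by omega) (by omega) (by omega),
          ih (i+1) (T * PySem.List.pyGetD numbers i 0) (by omega) (by omega) (by omega)]
      by_cases hA : reachB test (T + PySem.List.pyGetD numbers i 0) (tailNums numbers (i+1)) = true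
      · simp [hA]
      · by_cases hM : reachB test (T * PySem.List.pyGetD numbers i 0) (tailNums numbers (i+1)) = true
        · simp [hA, hM]
        · simp [hA, hM]

-- membership in one backward step
theorem mem_backStep_aux (n t : Int) :
    ∀ (l : List Int) (acc : PySem.Set Int),
      t ∈ l.foldl (fun nxt s =>
        let nxt1 := PySem.Set.add nxt (s - n)
        if n ≠ 0 ∧ PySem.Int.mod s n = 0 then PySem.Set.add nxt1 (PySem.Int.floordiv s n) else nxt1) acc
      ↔ t ∈ acc ∨ ∃ s ∈ l, t = s - n ∨ (n ≠ 0 ∧ PySem.Int.mod s n = 0 ∧ t = PySem.Int.floordiv s n) := by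
  intro l
  induction l with
  | nil => simp
  | cons s l ih =>
    intro acc
    simp only [List.foldl_cons, ih]
    by_cases hd : n ≠ 0 ∧ PySem.Int.mod s n = 0
    · simp only [if_pos hd, PySem.Set.mem_add, List.mem_cons]
      constructor
      · rintro h; aesop
      · rintro h; aesop
    · simp only [if_neg hd, PySem.Set.mem_add, List.mem_cons]
      constructor
      · rintro h; aesop
      · rintro h; aesop

theorem mem_backStep (S : PySem.Set Int) (n t : Int) :
    t ∈ Check_pt1_backStep S n ↔
      ∃ s ∈ S, t = s - n ∨ (n ≠ 0 ∧ PySem.Int.mod s n = 0 ∧ t = PySem.Int.floordiv s n) := by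
  unfold Check_pt1_backStep
  rw [mem_backStep_aux]
  simp [PySem.Set.empty]

theorem reachB_append_of_univ (test : Int) (ms : List Int)
    (h : ∀ u, reachB test u ms = true) :
    ∀ (ns : List Int) (t : Int), reachB test t (ns ++ ms) = true := by
  intro ns
  induction ns with
  | nil => simpa using h
  | cons n ns ih => intro t; simp [reachB, ih]

theorem tailNums_append (numbers : List Int) (j k : Int)
    (h1 : j ≤ k) (h2 : k ≤ (numbers.length : Int)) :
    tailNums numbers j =
      ((PySem.List.pyRange j k 1).map (fun x => PySem.List.pyGetD numbers x 0)) ++ tailNums numbers k := by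
  unfold tailNums
  rw [PySem.List.pyRange_one_append j k (numbers.length : Int) h1 h2, List.map_append]

-- exact division facts
theorem floordiv_exact (s n : Int) (hm : PySem.Int.mod s n = 0) :
    PySem.Int.floordiv s n * n = s := by
  have := PySem.Int.floordiv_mul_add_mod s n
  omega

theorem floordiv_mul_self (t n : Int) (hn : n ≠ 0) :
    PySem.Int.mod (t * n) n = 0 ∧ PySem.Int.floordiv (t * n) n = t := by
  have hd : PySem.Int.mod (t * n) n = 0 := (PySem.Int.mod_eq_zero_iff_dvd (t * n) n).2 ⟨t, mul_comm t n⟩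
  refine ⟨hd, ?_⟩
  have h2 := floordiv_exact (t * n) n hd
  exact mul_right_cancel₀ hn h2

-- B's countdown loop computes backward reachability
theorem altGo_spec (numbers : List Int) (test : Int) :
    ∀ (fuel : Nat) (i : Int) (S : PySem.Set Int),
      i < (numbers.length : Int) → -(numbers.length : Int) ≤ i + 1 - fuel →
      (∀ t, t ∈ S ↔ reachB test t (tailNums numbers (i + 1)) = true) →
      (match Check_pt1_altGo numbers fuel i S with
       | none => ∀ t, reachB test t (tailNums numbers (i + 1 - fuel)) = true
       | some S' => ∀ t, t ∈ S' ↔ reachB test t (tailNums numbers (i + 1 - fuel)) = true) := by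
  intro fuel
  induction fuel with
  | zero => intro i S _ _ hS; simpa using hS
  | succ fuel ih =>
    intro i S hilt hlo hS
    have hge : -(numbers.length : Int) ≤ i := by omega
    have hn := pyGet?_eq_getD numbers i hge hilt
    set n := PySem.List.pyGetD numbers i 0 with hn_def
    have htail : tailNums numbers i = n :: tailNums numbers (i + 1) := tailNums_cons numbers i hilt
    have hreach : ∀ t, reachB test t (tailNums numbers i) =
        (reachB test (t + n) (tailNums numbers (i+1)) || reachB test (t * n) (tailNums numbers (i+1))) := by
      intro t; rw [htail]; rfl
    simp only [Check_pt1_altGo, hn]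
    by_cases hz : n = 0 ∧ PySem.Set.contains S 0
    · rw [if_pos (by exact_mod_cast hz)]
      -- early return: everything reaches
      have h0 : (0 : Int) ∈ S := (PySem.Set.contains_iff S 0).1 hz.2
      have huniv : ∀ u, reachB test u (tailNums numbers i) = true := by
        intro u
        rw [hreach u]
        have : reachB test (u * n) (tailNums numbers (i+1)) = true := by
          rw [hz.1, mul_zero]
          exact (hS 0).1 h0
        simp [this]
      intro t
      rw [tailNums_append numbers (i + 1 - (fuel+1 : Nat)) i (by omega) (by omega)]
      exact reachB_append_of_univ test _ huniv _ t
    · rw [if_neg (by simpa using hz)]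
      have hS' : ∀ t, t ∈ Check_pt1_backStep S n ↔ reachB test t (tailNums numbers ((i-1) + 1)) = true := by
        intro t
        have : (i - 1) + 1 = i := by omega
        rw [this, hreach t, mem_backStep]
        constructor
        · rintro ⟨s, hs, rfl | ⟨hn0, hm, rfl⟩⟩
          · have : s - n + n = s := by ring
            rw [this]
            simp [(hS s).1 hs]
          · rw [floordiv_exact s n hm]
            simp [(hS s).1 hs]
        · intro h
          rcases Bool.or_eq_true_iff.1 h with h | h
          · exact ⟨t + n, (hS _).2 h, Or.inl (by ring)⟩
          · by_cases hn0 : n = 0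
            · exfalso
              apply hz
              refine ⟨hn0, (PySem.Set.contains_iff S 0).2 ?_⟩
              have h0n : t * n = 0 := by rw [hn0, mul_zero]
              rw [← h0n]
              exact (hS _).2 h
            · obtain ⟨hm, hq⟩ := floordiv_mul_self t n hn0
              exact ⟨t * n, (hS _).2 h, Or.inr ⟨hn0, hm, hq.symm⟩⟩
      have := ih (i - 1) (Check_pt1_backStep S n) (by omega) (by omega) hS'
      have harith : (i - 1) + 1 - (fuel : Nat) = i + 1 - ((fuel + 1 : Nat) : Int) := by push_cast; ring
      rw [harith] at this
      exact this

-- ===== VERDICT (by name: the statement is the Claim_ definition above) =====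
theorem Check_pt1_spec : Claim_equal_Check_pt1 := by
  intro numbers test index Total _ hPre
  obtain ⟨hne, hlo, hhi⟩ := hPre
  unfold Spec_Check_pt1 Check_pt1 Check_pt1_alt
  cases hT : (match Total with | some t => some t | none => PySem.List.pyGet? numbers 0) with
  | none => rfl
  | some t =>
    dsimp only
    have hA := goA_eq numbers test (((numbers.length : Int) - index).toNat + 1) index t hlo hhi (by omega)
    rw [hA]
    have hS0 : ∀ u, u ∈ PySem.Set.ofList [test] ↔
        reachB test u (tailNums numbers (((numbers.length : Int) - 1) + 1)) = true := by
      intro u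
      have h1 : ((numbers.length : Int) - 1) + 1 = (numbers.length : Int) := by ring
      rw [h1, tailNums_len]
      simp [PySem.Set.mem_ofList, reachB]
    have hB := altGo_spec numbers test (((numbers.length : Int) - index).toNat)
        ((numbers.length : Int) - 1) (PySem.Set.ofList [test]) (by omega) (by omega) hS0
    have harith : ((numbers.length : Int) - 1) + 1 - (((numbers.length : Int) - index).toNat : Int) = index := by omega
    rw [harith] at hB
    cases hAlt : Check_pt1_altGo numbers (((numbers.length : Int) - index).toNat)
        ((numbers.length : Int) - 1) (PySem.Set.ofList [test]) with
    | none =>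
      rw [hAlt] at hB
      simp [hB t]
    | some S' =>
      rw [hAlt] at hB
      dsimp only at hB
      by_cases hr : reachB test t (tailNums numbers index) = true
      · have hc : PySem.Set.contains S' t = true := (PySem.Set.contains_iff S' t).2 ((hB t).2 hr)
        simp [hr, hB t]
      · have hc : PySem.Set.contains S' t = false := by
          rw [← Bool.not_eq_true]
          intro h
          exact hr ((hB t).1 ((PySem.Set.contains_iff S' t).1 h))
        simp only [Bool.not_eq_true] at hr
        simp [hr, hB t]
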